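-- pv_equiv track=rewrite | github.com/cheehongw/leetcode-submissions | submissions/1818-maximum-score-from-removing-substrings/solution.py | removeABs
-- ===== SOURCE A (Python) =====
-- def removeABs(s, x):
--     stack = []
--     points = 0
--     for c in s:
--         if (c == 'b' and stack and stack[-1] == 'a'):
--             points += x
--             stack.pop()
--         else:
--             stack.append(c)
--
--     return ''.join(stack), points
-- ===== SOURCE B (Python) =====
-- def removeABs(s, x):
--     points = 0
--     while 'ab' in s:
--         t = s.replace('ab', '')
--         points += x * ((len(s) - len(t)) // 2)
--         s = t
--     return s, points
-- ===== Notes on version B (the rewrite author's own statement) =====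
-- stated objective: alternative
-- what changed: The character-by-character stack scan is replaced by a fixed-point loop of global 'ab'->'' replacements, scoring x times half the per-pass length drop; confluence of the ab-deletion rewrite makes the normal form and total count identical.
import Mathlib
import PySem

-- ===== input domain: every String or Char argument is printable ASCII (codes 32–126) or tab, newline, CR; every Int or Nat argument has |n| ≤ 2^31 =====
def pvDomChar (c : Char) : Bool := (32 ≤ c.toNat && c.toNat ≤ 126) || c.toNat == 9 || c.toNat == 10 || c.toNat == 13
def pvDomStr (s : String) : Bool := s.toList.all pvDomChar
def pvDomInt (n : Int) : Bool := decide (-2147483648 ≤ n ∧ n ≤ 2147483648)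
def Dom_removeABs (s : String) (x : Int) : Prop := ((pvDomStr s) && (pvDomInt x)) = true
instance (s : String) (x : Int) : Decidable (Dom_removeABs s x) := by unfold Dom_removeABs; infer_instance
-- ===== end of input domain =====

-- B replaces A's one-pass character stack by a fixed-point loop of global 'ab'→'' replacements,
-- scoring x · (length drop)/2 per pass; same return value (alternative algorithm, no speed claim).

-- ===== PORT A =====
-- body of A's for-loop (state = (stack, points))
def removeABsStep (x : Int) (acc : List Char × Int) (c : Char) : List Char × Int :=
  if c = 'b' ∧ acc.1 ≠ [] ∧ acc.1.getLast? = some 'a' then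
    (acc.1.dropLast, acc.2 + x)
  else
    (acc.1 ++ [c], acc.2)

def removeABs (s : String) (x : Int) : String × Int :=
  let r := s.toList.foldl (removeABsStep x) ([], 0)
  (String.mk r.1, r.2)

-- ===== PORT B =====
-- Termination helpers for the loop port (cited by name in `decreasing_by`):
-- `pvRepK l` is the list produced by one pass of s.replace('ab','') together with the number of
-- occurrences removed; it characterises PySem.Chars.replace and shows the pass shrinks the string.
def pvRepK : List Char → List Char × Nat
  | [] => ([], 0)
  | c :: t =>
    if c = 'a' ∧ t.head? = some 'b' then
      ((pvRepK t.tail).1, (pvRepK t.tail).2 + 1)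
    else
      (c :: (pvRepK t).1, (pvRepK t).2)
termination_by l => l.length
decreasing_by
  · simpa using Nat.lt_succ_of_le (Nat.sub_le _ _)
  · simp

theorem pv_go_nil (fuel : Nat) (acc : List Char) :
    PySem.Chars.replace.go ['a','b'] [] (fuel+1) [] acc = acc.reverse := by
  rw [PySem.Chars.replace.go] <;> simp

theorem pv_go_cons (fuel : Nat) (c : Char) (t acc : List Char) :
    PySem.Chars.replace.go ['a','b'] [] (fuel+1) (c :: t) acc =
      if ['a','b'].isPrefixOf (c :: t) then
        PySem.Chars.replace.go ['a','b'] [] fuel ((c :: t).drop 2) acc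
      else PySem.Chars.replace.go ['a','b'] [] fuel t (c :: acc) := by
  rw [PySem.Chars.replace.go] <;> simp

theorem pvRepK_go (fuel : Nat) : ∀ (l acc : List Char), l.length ≤ fuel →
    PySem.Chars.replace.go ['a','b'] [] fuel l acc = acc.reverse ++ (pvRepK l).1 := by
  induction fuel with
  | zero =>
    intro l acc h
    have hl : l = [] := List.eq_nil_of_length_eq_zero (Nat.le_zero.mp h)
    subst hl
    rw [PySem.Chars.replace.go]; simp [pvRepK]
  | succ n ih =>
    intro l acc h
    match l with
    | [] => rw [pv_go_nil]; simp [pvRepK]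
    | c :: t =>
      rw [pv_go_cons]
      by_cases hp : c = 'a' ∧ t.head? = some 'b'
      · obtain ⟨hc, ht⟩ := hp
        obtain ⟨t', ht'⟩ : ∃ t', t = 'b' :: t' := by
          cases t with
          | nil => simp at ht
          | cons d t' => simp at ht; exact ⟨t', by rw [ht]⟩
        subst hc ht'
        rw [if_pos (by simp [List.isPrefixOf_iff_prefix])]
        simp only [List.drop_succ_cons, List.drop_zero]
        rw [ih t' acc (by simp at h; omega)]
        rw [pvRepK]; simp
      · have hnp : ¬ (['a','b'].isPrefixOf (c :: t) = true) := by
          simp only [List.isPrefixOf_iff_prefix]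
          intro hpre
          rcases (List.cons_prefix_cons.mp hpre) with ⟨hc, hb⟩
          cases t with
          | nil => simp at hb
          | cons d t' =>
            rcases (List.cons_prefix_cons.mp hb) with ⟨hd, _⟩
            exact hp ⟨hc.symm, by simp [← hd]⟩
        rw [if_neg hnp]
        rw [ih t (c :: acc) (by simp at h ⊢; omega)]
        rw [pvRepK, if_neg hp]
        simp

theorem pvRepK_replace (l : List Char) :
    PySem.Chars.replace l ['a','b'] [] = (pvRepK l).1 := by
  rw [PySem.Chars.replace]
  simp only [List.isEmpty_cons, if_false, Bool.false_eq_true]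
  simpa using pvRepK_go l.length l [] le_rfl

theorem pvRepK_length (l : List Char) : (pvRepK l).1.length + 2 * (pvRepK l).2 = l.length := by
  induction l using pvRepK.induct with
  | case1 => simp [pvRepK]
  | case2 c t h ih =>
    obtain ⟨hc, ht⟩ := h
    obtain ⟨t', ht'⟩ : ∃ t', t = 'b' :: t' := by
      cases t with
      | nil => simp at ht
      | cons d t' => simp at ht; exact ⟨t', by rw [ht]⟩
    subst hc ht'
    rw [pvRepK]; simp at ih ⊢; omega
  | case3 c t h ih =>
    rw [pvRepK, if_neg h]; simp; omega

theorem pvRepK_pos (l : List Char) (h : ['a','b'] <:+: l) : 1 ≤ (pvRepK l).2 := by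
  induction l using pvRepK.induct with
  | case1 => simp at h
  | case2 c t hab ih => rw [pvRepK, if_pos hab]; omega
  | case3 c t hab ih =>
    rcases List.infix_cons_iff.mp h with hpre | hinf
    · exfalso
      rcases (List.cons_prefix_cons.mp hpre) with ⟨hc, hb⟩
      cases t with
      | nil => simp at hb
      | cons d t' =>
        rcases (List.cons_prefix_cons.mp hb) with ⟨hd, _⟩
        exact hab ⟨hc.symm, by simp [← hd]⟩
    · rw [pvRepK, if_neg hab]; simpa using ih hinf

theorem replace_ab_length_lt (l : List Char) (h : PySem.Chars.isIn ['a','b'] l = true) :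
    (PySem.Chars.replace l ['a','b'] []).length < l.length := by
  have hinf : ['a','b'] <:+: l := (PySem.Chars.isIn_iff_infix _ _).mp h
  have h1 := pvRepK_length l
  have h2 := pvRepK_pos l hinf
  rw [pvRepK_replace]; omega

-- the while-loop of B (state = (s, points))
def removeABsLoop (x : Int) (s : List Char) (points : Int) : List Char × Int :=
  if h : PySem.Chars.isIn ['a','b'] s = true then
    let t := PySem.Chars.replace s ['a','b'] []
    removeABsLoop x t
      (points + x * PySem.Int.floordiv ((s.length : Int) - (t.length : Int)) 2)
  else (s, points)
termination_by s.length
decreasing_by exact replace_ab_length_lt s h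

def removeABs_alt (s : String) (x : Int) : String × Int :=
  let r := removeABsLoop x s.toList 0
  (String.mk r.1, r.2)

-- ===== PRECONDITION & SPEC =====
def Spec_removeABs (s : String) (x : Int) (out : String × Int) : Prop := out = removeABs_alt s x
instance (s : String) (x : Int) (out : String × Int) : Decidable (Spec_removeABs s x out) := by unfold Spec_removeABs; infer_instance

-- ===== CLAIM (what is proved, stated in full; the proofs are below) =====
def Claim_equal_removeABs : Prop := ∀ (s : String) (x : Int), Dom_removeABs s x → Spec_removeABs s x (removeABs s x)

-- ===== LEMMAS AND PROOFS =====

-- the points component of A's step is additive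
theorem step_add (x : Int) (st : List Char) (p q : Int) (c : Char) :
    removeABsStep x (st, p + q) c =
      ((removeABsStep x (st, p) c).1, (removeABsStep x (st, p) c).2 + q) := by
  unfold removeABsStep
  split_ifs <;> simp <;> ring

-- one pass of 'ab'→'' commutes with A's stack fold
theorem foldl_step_repK (x : Int) (l : List Char) : ∀ (st : List Char) (p : Int),
    l.foldl (removeABsStep x) (st, p) =
      (pvRepK l).1.foldl (removeABsStep x) (st, p + x * ((pvRepK l).2 : Int)) := by
  induction l using pvRepK.induct with
  | case1 => intro st p; simp [pvRepK]
  | case2 c t hab ih =>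
    intro st p
    obtain ⟨hc, ht⟩ := hab
    obtain ⟨t', ht'⟩ : ∃ t', t = 'b' :: t' := by
      cases t with
      | nil => simp at ht
      | cons d t' => simp at ht; exact ⟨t', by rw [ht]⟩
    subst hc ht'
    have hrep : pvRepK ('a' :: 'b' :: t') = ((pvRepK t').1, (pvRepK t').2 + 1) := by
      rw [pvRepK]; simp
    simp only [List.tail_cons] at ih
    rw [hrep]
    simp only [List.foldl_cons]
    have h1 : removeABsStep x (st, p) 'a' = (st ++ ['a'], p) := by
      unfold removeABsStep; simp
    have h2 : removeABsStep x (st ++ ['a'], p) 'b' = (st, p + x) := by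
      unfold removeABsStep; simp
    rw [h1, h2, ih st (p + x)]
    have harith : p + x + x * ((pvRepK t').2 : Int)
        = p + x * (((pvRepK t').2 + 1 : Nat) : Int) := by push_cast; ring
    rw [harith]
  | case3 c t hab ih =>
    intro st p
    rw [pvRepK, if_neg hab]
    simp only [List.foldl_cons]
    have := step_add x st p (x * ((pvRepK t).2 : Int)) c
    rw [this, ih]

-- an 'ab'-free string passes through A's stack unchanged
theorem foldl_step_irred (x : Int) (l : List Char) : ∀ (st : List Char) (p : Int),
    ¬ (['a','b'] <:+: (st ++ l)) → l.foldl (removeABsStep x) (st, p) = (st ++ l, p) := by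
  induction l with
  | nil => intro st p _; simp
  | cons c t ih =>
    intro st p h
    simp only [List.foldl_cons]
    have hstep : removeABsStep x (st, p) c = (st ++ [c], p) := by
      unfold removeABsStep
      rw [if_neg]
      rintro ⟨hc, -, hlast⟩
      obtain ⟨st₀, hst⟩ := List.getLast?_eq_some_iff.mp hlast
      apply h
      subst hc hst
      exact ⟨st₀, t, by simp⟩
    rw [hstep, ih (st ++ [c]) p (by simpa using h)]
    simp

theorem main_loop (x : Int) (n : Nat) : ∀ (l : List Char) (p : Int), l.length ≤ n →
    l.foldl (removeABsStep x) ([], p) = removeABsLoop x l p := by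
  induction n with
  | zero =>
    intro l p h
    have hl : l = [] := List.eq_nil_of_length_eq_zero (Nat.le_zero.mp h)
    subst hl
    rw [removeABsLoop, dif_neg (by decide)]
    simp
  | succ n ih =>
    intro l p h
    rw [removeABsLoop]
    by_cases hin : PySem.Chars.isIn ['a','b'] l = true
    · rw [dif_pos hin]
      show List.foldl (removeABsStep x) ([], p) l =
        removeABsLoop x (PySem.Chars.replace l ['a','b'] [])
          (p + x * PySem.Int.floordiv ((l.length : Int) - ((PySem.Chars.replace l ['a','b'] []).length : Int)) 2)
      have hinf : ['a','b'] <:+: l := (PySem.Chars.isIn_iff_infix _ _).mp hin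
      have hlen := pvRepK_length l
      have hk := pvRepK_pos l hinf
      have hrepl := pvRepK_replace l
      have hflr : PySem.Int.floordiv ((l.length : Int) - ((PySem.Chars.replace l ['a','b'] []).length : Int)) 2
          = ((pvRepK l).2 : Int) := by
        rw [hrepl]
        have : ((l.length : Int) - (((pvRepK l).1.length : Nat) : Int)) = ((pvRepK l).2 : Int) * 2 := by
          omega
        rw [this, PySem.Int.floordiv_eq_ediv_of_pos (by norm_num)]
        omega
      rw [hflr, hrepl]
      rw [foldl_step_repK x l [] p]
      exact ih (pvRepK l).1 (p + x * ((pvRepK l).2 : Int)) (by omega)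
    · rw [dif_neg hin]
      have hninf : ¬ (['a','b'] <:+: l) := by
        intro hc
        exact hin ((PySem.Chars.isIn_iff_infix _ _).mpr hc)
      simpa using foldl_step_irred x l [] p hninf

-- ===== VERDICT (by name: the statement is the Claim_ definition above) =====
theorem removeABs_spec : Claim_equal_removeABs := by
  intro s x _
  unfold Spec_removeABs removeABs removeABs_alt
  rw [main_loop x s.toList.length s.toList 0 le_rfl]
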